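-- pv_equiv track=rewrite | github.com/rshaikh2200/AI-Case-Study3 | src/safetybehavior_activefailure.py | parse_case_studies_from_text
-- ===== SOURCE A (Python) =====
-- CASE_HEADING_PREFIXES = ["the case", "case & commentary"]
--
-- def parse_case_studies_from_text(pdf_text: str):
--     lines = pdf_text.splitlines()
--     current_title = None
--     case_text      = []
--     collecting     = False
--
--     for idx, raw in enumerate(lines):
--         line = raw.strip()
--         low  = line.lower()
--
--         if any(low.startswith(pref) for pref in CASE_HEADING_PREFIXES):
--             # If we were previously collecting, yield the current chunk before starting a new one
--             if current_title and case_text: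
--                 yield current_title, "\n".join(case_text)
--
--             title = "Unknown Title"
--             for j in range(idx-1, -1, -1):
--                 prev = lines[j].strip()
--                 if prev:
--                     title = prev.rstrip('.')
--                     break
--
--             # MODIFICATION: If the heading line itself starts with "case study" or "clinical sequence",
--             # use that line as the title instead of the previous line.
--             # We do this so we capture titles like "Case Study Inappropriate Anesthesia..."
--             if any(x in low for x in ["case study", "clinical sequence"]):
--                 title = raw
--
--             current_title = title
--             case_text     = [line]
--             collecting    = True
--         elif collecting:
--             case_text.append(line)
--
--     if current_title and case_text:
--         yield current_title, "\n".join(case_text)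
-- ===== SOURCE B (Python) =====
-- CASE_HEADING_PREFIXES = ["the case", "case & commentary"]
--
-- def parse_case_studies_from_text(pdf_text: str):
--     lines = pdf_text.splitlines()
--     # phase 1: indices of all heading lines
--     heads = [i for i, raw in enumerate(lines)
--              if any(raw.strip().lower().startswith(p) for p in CASE_HEADING_PREFIXES)]
--     out = []
--     # phase 2: one chunk per heading, bounded by the next heading
--     for k, h in enumerate(heads):
--         end = heads[k + 1] if k + 1 < len(heads) else len(lines)
--         raw = lines[h]
--         low = raw.strip().lower()
--         if "case study" in low or "clinical sequence" in low:
--             title = raw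
--         else:
--             title = "Unknown Title"
--             for j in range(h - 1, -1, -1):
--                 prev = lines[j].strip()
--                 if prev:
--                     title = prev.rstrip('.')
--                     break
--         if title:
--             out.append((title, "\n".join(s.strip() for s in lines[h:end])))
--     return out
-- ===== Notes on version B (the rewrite author's own statement) =====
-- stated objective: alternative
-- what changed: A's single-pass state machine (current_title/case_text/collecting flags mutated line by line) is replaced by a two-phase decomposition: one pass records all heading-line indices, then each chunk is built directly as the slice of lines between consecutive heading indices, with the title computed per heading.
import Mathlib
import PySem

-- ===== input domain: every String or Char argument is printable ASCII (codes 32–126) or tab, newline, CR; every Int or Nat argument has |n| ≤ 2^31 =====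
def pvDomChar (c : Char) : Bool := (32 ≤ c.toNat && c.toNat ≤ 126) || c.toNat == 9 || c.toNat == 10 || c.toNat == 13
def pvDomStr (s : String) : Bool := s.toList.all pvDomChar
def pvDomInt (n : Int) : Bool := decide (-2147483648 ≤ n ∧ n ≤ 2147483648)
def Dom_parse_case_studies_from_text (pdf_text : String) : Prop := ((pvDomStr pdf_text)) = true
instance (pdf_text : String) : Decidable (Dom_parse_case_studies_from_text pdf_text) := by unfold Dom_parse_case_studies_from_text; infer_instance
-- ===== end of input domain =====

-- B replaces A's single-pass collecting-flag state machine by a two-phase decomposition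
-- (record all heading indices, then build one chunk per heading from the index bounds);
-- objective: alternative structure, same cost.

-- ===== PORT A =====
def CASE_HEADING_PREFIXES : List String := ["the case", "case & commentary"]

-- the heading test 'any(<stripped lowered line>.startswith(pref) for pref in CASE_HEADING_PREFIXES)';
-- this identical generator expression occurs in both Pythons, so the helper is shared.
def isHeadingLine (raw : String) : Bool :=
  CASE_HEADING_PREFIXES.any
    (fun pref => PySem.Str.startswith (PySem.Str.lower (PySem.Str.strip raw)) pref)

-- prev.rstrip('.') ported by hand (drop trailing '.' code points) — exact for every string
def pyRstripDots (s : String) : String :=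
  String.ofList ((s.toList.reverse.dropWhile (fun c => c = '.')).reverse)

-- the backward title scan 'for j in range(idx-1, -1, -1): ...' — this identical loop occurs
-- verbatim in both Pythons, so the helper is shared; `n` is the exclusive upper bound (idx),
-- scanned j = n-1 … 0.  lines.getD j "" is exact here: only called with j < lines.length.
def prevTitle (lines : List String) : Nat → String
  | 0 => "Unknown Title"
  | j + 1 =>
    let prev := PySem.Str.strip (lines.getD j "")
    if prev ≠ "" then pyRstripDots prev else prevTitle lines j

-- Python truthiness of current_title (None and "" are falsy)
def strTruthy : Option String → Bool
  | none => false
  | some s => s ≠ ""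

-- loop body of A's 'for idx, raw in enumerate(lines)'; state = (current_title, case_text, collecting, yielded)
def stepA (lines : List String)
    (st : Option String × List String × Bool × List (String × String)) (p : Int × String) :
    Option String × List String × Bool × List (String × String) :=
  let (ct, cs, col, acc) := st
  if isHeadingLine p.2 then
    let acc' := acc ++ (if strTruthy ct ∧ cs ≠ []
                        then [(ct.getD "", PySem.Str.join "\n" cs)] else [])
    let low := PySem.Str.lower (PySem.Str.strip p.2)
    let title := prevTitle lines p.1.toNat
    let title := if ["case study", "clinical sequence"].any (fun x => PySem.Str.isIn x low)
                 then p.2 else title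
    (some title, [PySem.Str.strip p.2], true, acc')
  else if col then (ct, cs ++ [PySem.Str.strip p.2], col, acc)
  else (ct, cs, col, acc)

def parse_case_studies_from_text (pdf_text : String) : List (String × String) :=
  let lines := PySem.Str.splitlines pdf_text
  let r := (PySem.List.enumerate lines 0).foldl (stepA lines) (none, [], false, [])
  r.2.2.2 ++ (if strTruthy r.1 ∧ r.2.1 ≠ []
              then [(r.1.getD "", PySem.Str.join "\n" r.2.1)] else [])

-- ===== PORT B =====
-- phase-2 loop of B: 'for k, h in enumerate(heads)' with end = heads[k+1] (the tail's head)
-- or len(lines).  lines.getD h.toNat "" is exact: heads only holds indices of lines.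
def goB (lines : List String) : List Int → List (String × String)
  | [] => []
  | h :: hs =>
    let e : Int := match hs with | [] => (lines.length : Int) | h2 :: _ => h2
    let raw := lines.getD h.toNat ""
    let low := PySem.Str.lower (PySem.Str.strip raw)
    let title := if PySem.Str.isIn "case study" low || PySem.Str.isIn "clinical sequence" low
                 then raw else prevTitle lines h.toNat
    (if title ≠ "" then
       [(title, PySem.Str.join "\n" ((PySem.List.slice lines (some h) (some e)).map PySem.Str.strip))]
     else []) ++ goB lines hs

def parse_case_studies_from_text_alt (pdf_text : String) : List (String × String) :=
  let lines := PySem.Str.splitlines pdf_text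
  let heads := (PySem.List.enumerate lines 0).filterMap
    (fun p => if isHeadingLine p.2 then some p.1 else none)
  goB lines heads

-- ===== PRECONDITION & SPEC =====
def Spec_parse_case_studies_from_text (pdf_text : String) (out : List (String × String)) : Prop := out = parse_case_studies_from_text_alt pdf_text
instance (pdf_text : String) (out : List (String × String)) : Decidable (Spec_parse_case_studies_from_text pdf_text out) := by unfold Spec_parse_case_studies_from_text; infer_instance

-- ===== CLAIM (what is proved, stated in full; the proofs are below) =====
def Claim_equal_parse_case_studies_from_text : Prop := ∀ (pdf_text : String), Dom_parse_case_studies_from_text pdf_text → Spec_parse_case_studies_from_text pdf_text (parse_case_studies_from_text pdf_text)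

-- ===== LEMMAS AND PROOFS =====

-- heading indices of the suffix `rest` of the line list, whose first line has index i
def hFrom : List String → Nat → List Nat
  | [], _ => []
  | r :: rs, i => if isHeadingLine r then i :: hFrom rs (i + 1) else hFrom rs (i + 1)

-- the title attached to the heading at index h
def titleAt (lines : List String) (h : Nat) : String :=
  if PySem.Str.isIn "case study" (PySem.Str.lower (PySem.Str.strip (lines.getD h ""))) ||
     PySem.Str.isIn "clinical sequence" (PySem.Str.lower (PySem.Str.strip (lines.getD h "")))
  then lines.getD h "" else prevTitle lines h

-- 'yield title, "\n".join(chunk)' guarded by truthiness of both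
def closeS (t : String) (cs : List String) : List (String × String) :=
  if t ≠ "" ∧ cs ≠ [] then [(t, PySem.Str.join "\n" cs)] else []

-- reference result: one chunk per heading index, bounded by the next heading index
def emit (lines : List String) : List Nat → List (String × String)
  | [] => []
  | h :: hs =>
    (if titleAt lines h ≠ "" then
      [(titleAt lines h, PySem.Str.join "\n"
        (((lines.drop h).take ((match hs with | [] => lines.length | h2 :: _ => h2) - h)).map
          PySem.Str.strip))]
     else []) ++ emit lines hs

-- A's fold over the enumerated suffix, followed by the final yield
def totalA (lines rest : List String) (i : Nat)
    (st : Option String × List String × Bool × List (String × String)) : List (String × String) :=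
  let r := (PySem.List.enumerate rest (i : Int)).foldl (stepA lines) st
  r.2.2.2 ++ (if strTruthy r.1 ∧ r.2.1 ≠ []
              then [(r.1.getD "", PySem.Str.join "\n" r.2.1)] else [])

lemma totalA_nil (lines : List String) (i : Nat) st :
    totalA lines [] i st =
      st.2.2.2 ++ (if strTruthy st.1 ∧ st.2.1 ≠ []
                   then [(st.1.getD "", PySem.Str.join "\n" st.2.1)] else []) := by
  unfold totalA
  rw [PySem.List.enumerate_nil, List.foldl_nil]

lemma totalA_cons (lines : List String) (r : String) (rs : List String) (i : Nat) st :
    totalA lines (r :: rs) i st = totalA lines rs (i + 1) (stepA lines st ((i : Int), r)) := by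
  unfold totalA
  rw [PySem.List.enumerate_cons, List.foldl_cons]
  norm_cast

lemma hFrom_ge : ∀ (rest : List String) (i h : Nat), h ∈ hFrom rest i → i ≤ h := by
  intro rest
  induction rest with
  | nil => intro i h hm; simp [hFrom] at hm
  | cons r rs ih =>
    intro i h hm
    by_cases hr : isHeadingLine r
    · simp [hFrom, hr] at hm
      rcases hm with hm | hm
      · omega
      · have := ih (i + 1) h hm; omega
    · simp [hFrom, hr] at hm
      have := ih (i + 1) h hm; omega

lemma drop_cons_facts (lines rs : List String) (r : String) (i : Nat)
    (h : lines.drop i = r :: rs) :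
    lines.drop (i + 1) = rs ∧ lines[i]? = some r ∧ rs.length + 1 = lines.length - i := by
  have h1 : lines.drop (i + 1) = rs := by
    have := congrArg (List.drop 1) h
    simpa [List.drop_drop, Nat.add_comm] using this
  have h2 : lines[i]? = some r := by
    have := congrArg (fun l => l[0]?) h
    simpa [List.getElem?_drop] using this
  have h3 : rs.length + 1 = lines.length - i := by
    have := congrArg List.length h
    simp [List.length_drop] at this
    omega
  exact ⟨h1, h2, h3⟩

lemma goB_eq_emit (lines : List String) :
    ∀ hs : List Nat, goB lines (hs.map (fun n : Nat => (n : Int))) = emit lines hs := by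
  intro hs
  induction hs with
  | nil => simp only [List.map_nil, goB, emit]
  | cons h hs ih =>
    cases hs with
    | nil =>
      simp only [List.map_cons, List.map_nil, goB, emit]
      rw [PySem.List.slice_natCast]
      simp [titleAt]
    | cons h2 hs2 =>
      simp only [List.map_cons, goB] at ih ⊢
      rw [ih, emit]
      rw [PySem.List.slice_natCast]
      simp [titleAt]

lemma heads_eq : ∀ (rest : List String) (i : Nat),
    (PySem.List.enumerate rest (i : Int)).filterMap
        (fun p => if isHeadingLine p.2 then some p.1 else none)
      = (hFrom rest i).map (fun n : Nat => (n : Int)) := by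
  intro rest
  induction rest with
  | nil => intro i; simp only [PySem.List.enumerate_nil, List.filterMap_nil, hFrom, List.map_nil]
  | cons r rs ih =>
    intro i
    have hc : ((i : Int) + 1) = ((i + 1 : Nat) : Int) := by push_cast; ring
    simp only [PySem.List.enumerate_cons, List.filterMap_cons, hFrom]
    rw [hc, ih (i + 1)]
    by_cases hr : isHeadingLine r
    · simp [hr]
    · simp [hr]

lemma stepA_eval_heading (lines : List String) (i : Nat) (r : String)
    (hr : isHeadingLine r = true) (hget : lines[i]? = some r) (ct cs col acc) :
    stepA lines (ct, cs, col, acc) ((i : Int), r) =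
      (some (titleAt lines i), [PySem.Str.strip r], true,
        acc ++ (if strTruthy ct ∧ cs ≠ []
                then [(ct.getD "", PySem.Str.join "\n" cs)] else [])) := by
  simp [stepA, hr, titleAt, List.getD_eq_getElem?_getD, hget]

lemma emit_head (lines rs : List String) (r : String) (i : Nat)
    (hdrop : lines.drop i = r :: rs) :
    (match hFrom rs (i + 1) with
      | [] => closeS (titleAt lines i) (PySem.Str.strip r :: rs.map PySem.Str.strip)
      | h :: hs =>
          closeS (titleAt lines i)
              (PySem.Str.strip r :: (rs.take (h - (i + 1))).map PySem.Str.strip)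
            ++ emit lines (h :: hs))
      = emit lines (i :: hFrom rs (i + 1)) := by
  obtain ⟨h1, h2, h3⟩ := drop_cons_facts lines rs r i hdrop
  cases hF : hFrom rs (i + 1) with
  | nil =>
    have ht : ((lines.drop i).take (lines.length - i)).map PySem.Str.strip
        = PySem.Str.strip r :: rs.map PySem.Str.strip := by
      rw [hdrop, List.take_of_length_le (by simp; omega)]
      simp
    simp only [emit]
    rw [ht]
    simp [closeS]
  | cons h' hs' =>
    have hge : i + 1 ≤ h' := hFrom_ge rs (i + 1) h' (by rw [hF]; exact List.mem_cons_self)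
    have ht : ((lines.drop i).take (h' - i)).map PySem.Str.strip
        = PySem.Str.strip r :: (rs.take (h' - (i + 1))).map PySem.Str.strip := by
      rw [hdrop]
      have he : h' - i = (h' - (i + 1)) + 1 := by omega
      rw [he, List.take_succ_cons]
      simp
    simp only [emit]
    rw [ht]
    simp [closeS]

lemma close_pending (t : String) (cs : List String) (hcs : cs ≠ []) :
    (if strTruthy (some t) ∧ cs ≠ []
     then [((some t).getD "", PySem.Str.join "\n" cs)] else []) = closeS t cs := by
  simp [closeS, strTruthy, hcs]

lemma loopA_collect (lines : List String) :
    ∀ (rest : List String) (i : Nat) (t : String) (cs : List String)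
      (acc : List (String × String)),
      lines.drop i = rest → cs ≠ [] →
      totalA lines rest i (some t, cs, true, acc) =
        acc ++ (match hFrom rest i with
          | [] => closeS t (cs ++ rest.map PySem.Str.strip)
          | h :: hs =>
              closeS t (cs ++ (rest.take (h - i)).map PySem.Str.strip) ++ emit lines (h :: hs)) := by
  intro rest
  induction rest with
  | nil =>
    intro i t cs acc hdrop hcs
    rw [totalA_nil]
    simp only [hFrom]
    rw [close_pending t cs hcs]
    simp [closeS]
  | cons r rs ih =>
    intro i t cs acc hdrop hcs
    obtain ⟨h1, h2, h3⟩ := drop_cons_facts lines rs r i hdrop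
    rw [totalA_cons]
    by_cases hr : isHeadingLine r
    · rw [stepA_eval_heading lines i r hr h2]
      rw [ih (i + 1) (titleAt lines i) [PySem.Str.strip r] _ h1 (by simp)]
      rw [close_pending t cs hcs]
      simp only [List.cons_append, List.nil_append]
      rw [emit_head lines rs r i hdrop]
      simp only [hFrom, hr, if_true, List.append_assoc]
      simp
    · have hstep : stepA lines (some t, cs, true, acc) ((i : Int), r) =
          (some t, cs ++ [PySem.Str.strip r], true, acc) := by
        simp [stepA, hr]
      rw [hstep, ih (i + 1) t (cs ++ [PySem.Str.strip r]) acc h1 (by simp)]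
      simp only [hFrom, hr, Bool.false_eq_true, if_false]
      cases hF : hFrom rs (i + 1) with
      | nil => simp
      | cons h' hs' =>
        have hge : i + 1 ≤ h' := hFrom_ge rs (i + 1) h' (by rw [hF]; exact List.mem_cons_self)
        have htake : (r :: rs).take (h' - i) = r :: rs.take (h' - (i + 1)) := by
          have he : h' - i = (h' - (i + 1)) + 1 := by omega
          rw [he, List.take_succ_cons]
        simp [htake]

lemma loopA_start (lines : List String) :
    ∀ (rest : List String) (i : Nat) (acc : List (String × String)),
      lines.drop i = rest →
      totalA lines rest i (none, [], false, acc) = acc ++ emit lines (hFrom rest i) := by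
  intro rest
  induction rest with
  | nil =>
    intro i acc hdrop
    rw [totalA_nil]
    simp [hFrom, emit, strTruthy]
  | cons r rs ih =>
    intro i acc hdrop
    obtain ⟨h1, h2, h3⟩ := drop_cons_facts lines rs r i hdrop
    rw [totalA_cons]
    by_cases hr : isHeadingLine r
    · rw [stepA_eval_heading lines i r hr h2]
      rw [loopA_collect lines rs (i + 1) (titleAt lines i) [PySem.Str.strip r] _ h1 (by simp)]
      simp only [strTruthy, List.cons_append, List.nil_append, Bool.false_eq_true, false_and,
        if_false, List.append_nil]
      rw [emit_head lines rs r i hdrop]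
      simp [hFrom, hr]
    · have hstep : stepA lines (none, [], false, acc) ((i : Int), r) =
          (none, [], false, acc) := by
        simp [stepA, hr]
      rw [hstep, ih (i + 1) acc h1]
      simp [hFrom, hr]

-- ===== VERDICT (by name: the statement is the Claim_ definition above) =====
theorem parse_case_studies_from_text_spec : Claim_equal_parse_case_studies_from_text := by
  intro pdf_text _hdom
  unfold Spec_parse_case_studies_from_text
  show parse_case_studies_from_text pdf_text = parse_case_studies_from_text_alt pdf_text
  have hA : parse_case_studies_from_text pdf_text =
      totalA (PySem.Str.splitlines pdf_text) (PySem.Str.splitlines pdf_text) 0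
        (none, [], false, []) := by
    simp only [parse_case_studies_from_text, totalA, Nat.cast_zero]
  have hh := heads_eq (PySem.Str.splitlines pdf_text) 0
  simp only [Nat.cast_zero] at hh
  have hB : parse_case_studies_from_text_alt pdf_text =
      emit (PySem.Str.splitlines pdf_text) (hFrom (PySem.Str.splitlines pdf_text) 0) := by
    simp only [parse_case_studies_from_text_alt]
    rw [hh, goB_eq_emit]
  rw [hA, hB, loopA_start _ _ 0 [] (by simp)]
  simp
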